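/- GENERATED by tools/from_farm_form.py from farm/worked/memset/Proof.lean (a worked proof of the farm's unit `memset`,
   accepted by the verdict) — do not edit. -/
import ProgX.Base.Spec.Units.memset

open X86 X86.User Asan ProgX.Base

set_option maxRecDepth 4000
set_option maxHeartbeats 4000000

/-- `memset` satisfies its contract: a loop (`u_loop` / `u_loop_back`) with one check call and one store inside, five pushes
and pops around it. -/
theorem ProgX.Base.Spec.Proved.memset_ok : ProgX.Base.Spec.memset.Statement := by
  intro Lay hLay μ hμ u₀ hcode hstore1 others frames u ret he hpre
  v_entry he
  obtain ⟨hsh, hlive⟩ := hpre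
  -- where the destination is: one arithmetic fact
  have hsp := hsh.rsp
  have hwhere : (u.reg .rdx).toNat = 0 ∨
      (0x140000 ≤ (u.reg .rdi).toNat ∧ (u.reg .rdi).toNat + (u.reg .rdx).toNat ≤ 0xC00000 ∧
        ((u.reg .rsp).toNat + 8 ≤ (u.reg .rdi).toNat ∨ (u.reg .rdi).toNat + (u.reg .rdx).toNat ≤ 0x700000 ∨
          0x800000 ≤ (u.reg .rdi).toNat)) := by
    rcases hlive with h0 | hl
    · exact Or.inl h0
    · by_cases hn : (u.reg .rdx).toNat = 0
      · exact Or.inl hn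
      · exact Or.inr (hl.where_ hsh.inv hsh.offText (by omega))
  u_walk hcode [hμ.vendor] until [ProgX.Base.L.memset.loop1] span [ProgX.Base.L.textLo, ProgX.Base.L.textHi] side (v_side)
  -- the loop head: what varies is generalised, the exact memory is replaced by what stays true
  obtain ⟨i, hi, hile, hfill⟩ : ∃ i : Nat, s_101536.reg .rbx = UInt64.ofNat i ∧ i ≤ (u.reg .rdx).toNat ∧
      ∀ j, j < i → s_101536.mem.readLE (u.reg .rdi + UInt64.ofNat j) 1 = (u.reg .rsi).toNat % 256 :=
    ⟨0, w_rbx, Nat.zero_le _, fun j hj => absurd hj (Nat.not_lt_zero j)⟩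
  have hsame : Mem.SameExcept [⟨(u.reg .rsp).toNat - 64, (u.reg .rsp).toNat⟩,
      ⟨(u.reg .rdi).toNat, (u.reg .rdi).toNat + (u.reg .rdx).toNat⟩] u.mem s_101536.mem := by
    u_same
  have hun : ShadowUntouched u.mem s_101536.mem := by v_untouched
  have hs1 : UInt64.ofNat (s_101536.mem.readLE (u.reg .rsp - 8) 8) = u.reg .r14 := by u_resolve
  have hs2 : UInt64.ofNat (s_101536.mem.readLE (u.reg .rsp - 16) 8) = u.reg .r13 := by u_resolve
  have hs3 : UInt64.ofNat (s_101536.mem.readLE (u.reg .rsp - 24) 8) = u.reg .r12 := by u_resolve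
  have hs4 : UInt64.ofNat (s_101536.mem.readLE (u.reg .rsp - 32) 8) = u.reg .rbp := by u_resolve
  have hs5 : UInt64.ofNat (s_101536.mem.readLE (u.reg .rsp - 40) 8) = u.reg .rbx := by u_resolve
  have hs0 : UInt64.ofNat (s_101536.mem.readLE (u.reg .rsp) 8) = ret := by u_resolve
  have hdf : s_101536.flags .df = false := by
    rw [w_flags]
    exact he_df
  replace w_kept := w_kept.mono_all (S' := [.rbx, .r13, .r14, .r12, .rsp, .rbp, .rdi, .rax, .rcx, .rdx]) (by rfl)
  clear w_mem w_flags w_rbx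
  u_loop [i] (fun v => (u.reg .rdx).toNat - (v.reg .rbx).toNat)
  u_walk hcode [hμ.vendor] until [ProgX.Base.L.memset.loop1] span [ProgX.Base.L.textLo, ProgX.Base.L.textHi] side (v_side)
  · -- the check of the store: the byte is inside the destination, and no store so far went to the shadow
    have hl : LiveIn others frames (u.reg .rdi).toNat (u.reg .rdx).toNat := hlive.resolve_left (by u_omega)
    obtain ⟨hw1, hw2, hw3⟩ := hwhere.resolve_left (by u_omega)
    have hun' : ShadowUntouched u.mem s_10153f.mem := by v_untouched
    exact hl.accSmall hsh.inv hun' _ 1 (by decide) (by u_omega) (by u_omega)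
  · -- the back edge
    obtain ⟨hw1, hw2, hw3⟩ := hwhere.resolve_left (by u_omega)
    u_loop_back [i + 1]
    · rw [w_rbx, UInt64.ofNat_add]
      rfl
    · u_omega
    · -- the bytes set so far
      intro j hj
      by_cases hji : j = i
      · subst hji
        rw [w_mem]
        exact ProgX.Base.readLE_stored_byte32 _ _ _
      · have := hfill j (by omega)
        u_frame this
    · -- still no store to the shadow
      v_untouched
    · -- the direction flag: the check kept it (`w_df_10153f`), the `add` wrote status flags only
      rw [w_flags]
      simp only [X86.User.df_setStatus]
      assumption
    · rw [w_rbx]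
      u_omega
  · -- the exit, walked to the `ret`: the contract's `Returned`
    refine ReachVia.done (Or.inl ?_)
    v_returned
    refine ⟨w_rax, by rw [w_mem]; exact hun, ?_⟩
    intro j hj
    rw [w_mem]
    exact hfill j (by u_omega)
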